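-- pv_equiv track=rewrite | github.com/habramsohn/CountrySearch | utils.py | linkCutter
-- ===== SOURCE A (Python) =====
-- def linkCutter(links):
--     adjs = []
--     for link in links:
--         if link.count("/") > 2:
--             t = link.split("/")[:3]
--             x = "/".join(t)
--             adjs.append(x)
--         else:
--             adjs.append(link)
--     return adjs
-- ===== SOURCE B (Python) =====
-- def linkCutter(links):
--     adjs = []
--     for link in links:
--         kept = []
--         budget = 2  # slashes we may keep; stop at the third
--         for ch in link:
--             if ch == "/":
--                 if budget == 0:
--                     break
--                 budget -= 1
--             kept.append(ch)
--         adjs.append("".join(kept))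
--     return adjs
-- ===== Notes on version B (the rewrite author's own statement) =====
-- stated objective: alternative
-- what changed: Replaces count/split/take-3/rejoin per link by a single character scan that copies characters up to (but not including) the third '/', so no part list is ever built and the count>2 branch disappears.
import Mathlib
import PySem

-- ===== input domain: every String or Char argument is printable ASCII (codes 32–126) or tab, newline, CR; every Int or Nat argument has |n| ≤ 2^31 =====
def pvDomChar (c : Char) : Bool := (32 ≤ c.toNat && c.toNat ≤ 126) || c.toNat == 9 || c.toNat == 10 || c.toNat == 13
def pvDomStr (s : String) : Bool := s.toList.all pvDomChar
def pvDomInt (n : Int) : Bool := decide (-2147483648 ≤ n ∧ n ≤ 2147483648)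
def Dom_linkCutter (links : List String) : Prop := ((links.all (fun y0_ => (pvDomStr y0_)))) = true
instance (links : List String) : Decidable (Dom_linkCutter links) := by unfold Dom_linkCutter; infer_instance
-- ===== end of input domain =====

-- ===== PORT A =====
-- A: per link, if it has more than two '/', split on '/', keep the first three parts, rejoin.
def linkCutter (links : List String) : List String :=
  links.foldl (fun adjs link =>
    if PySem.Str.count link "/" > 2 then
      adjs ++ [PySem.Str.join "/" (PySem.List.slice ((PySem.Str.split? link "/").getD []) none (some 3))]
    else
      adjs ++ [link]) []

-- ===== PORT B =====
-- B: per link, one left-to-right scan copying characters, stopping just before the third '/'.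
def pvCut : List Char → Nat → List Char
  | [], _ => []
  | c :: rest, k =>
    if c = '/' then
      match k with
      | 0 => []
      | Nat.succ k' => c :: pvCut rest k'
    else c :: pvCut rest k

def linkCutter_alt (links : List String) : List String :=
  links.map (fun link => String.ofList (pvCut link.toList 2))

-- ===== PRECONDITION & SPEC =====
def Spec_linkCutter (links : List String) (out : List String) : Prop := out = linkCutter_alt links
instance (links : List String) (out : List String) : Decidable (Spec_linkCutter links out) := by unfold Spec_linkCutter; infer_instance

-- ===== CLAIM (what is proved, stated in full; the proofs are below) =====
def Claim_equal_linkCutter : Prop := ∀ (links : List String), Dom_linkCutter links → Spec_linkCutter links (linkCutter links)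

-- ===== LEMMAS AND PROOFS =====

-- model of Python's s.split("/") as structural recursion
def pvSplit : List Char → List (List Char)
  | [] => [[]]
  | c :: rest => if c = '/' then [] :: pvSplit rest else (pvSplit rest).modifyHead (c :: ·)

theorem pvSplit_ne_nil (cs : List Char) : pvSplit cs ≠ [] := by
  cases cs with
  | nil => simp [pvSplit]
  | cons c rest =>
    simp only [pvSplit]
    split
    · simp
    · cases h : pvSplit rest with
      | nil => exact absurd h (pvSplit_ne_nil rest)
      | cons p ps => simp [List.modifyHead]

theorem splitOn_go_eq (cs : List Char) : ∀ (fuel : Nat) (cur : List Char) (acc : List (List Char)),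
    cs.length < fuel →
    PySem.Chars.splitOn.go ['/'] fuel cs cur acc =
      acc.reverse ++ (pvSplit cs).modifyHead (cur.reverse ++ ·) := by
  induction cs with
  | nil =>
    intro fuel cur acc h
    match fuel with
    | Nat.succ f => simp [PySem.Chars.splitOn.go, pvSplit, List.modifyHead]
  | cons c rest ih =>
    intro fuel cur acc h
    match fuel with
    | Nat.succ f =>
      have hf : rest.length < f := by simpa using h
      by_cases hc : c = '/'
      · subst hc
        rw [PySem.Chars.splitOn.go]
        simp only [List.isPrefixOf, List.isPrefixOf_cons₂, beq_self_eq_true, Bool.true_and,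
          List.isPrefixOf_nil_left, if_pos]
        simp only [List.length_singleton, List.drop_succ_cons, List.drop_zero]
        rw [ih f [] (cur.reverse :: acc) hf,
          show pvSplit ('/' :: rest) = [] :: pvSplit rest from by simp [pvSplit]]
        cases pvSplit rest <;> simp [List.modifyHead]
      · rw [PySem.Chars.splitOn.go]
        have hpre : List.isPrefixOf ['/'] (c :: rest) = false := by
          simp [List.isPrefixOf]
          exact fun hb => hc hb.symm
        rw [if_neg (by simp [hpre])]
        rw [ih f (c :: cur) acc hf]
        simp only [pvSplit, if_neg hc]
        cases hps : pvSplit rest with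
        | nil => exact absurd hps (pvSplit_ne_nil rest)
        | cons p ps => simp [List.modifyHead]
  termination_by cs.length

theorem splitOn_eq_pvSplit (cs : List Char) : PySem.Chars.splitOn cs ['/'] = pvSplit cs := by
  unfold PySem.Chars.splitOn
  rw [splitOn_go_eq cs (cs.length + 1) [] [] (by omega)]
  cases h : pvSplit cs with
  | nil => exact absurd h (pvSplit_ne_nil cs)
  | cons p ps => simp [List.modifyHead]

theorem count_go_eq (cs : List Char) : ∀ (fuel : Nat) (acc : Nat), cs.length ≤ fuel →
    PySem.Chars.count.go ['/'] fuel cs acc = acc + cs.count '/' := by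
  induction cs with
  | nil =>
    intro fuel acc h
    match fuel with
    | 0 => simp [PySem.Chars.count.go]
    | Nat.succ f => simp [PySem.Chars.count.go]
  | cons c rest ih =>
    intro fuel acc h
    match fuel with
    | Nat.succ f =>
      have hf : rest.length ≤ f := by simpa using h
      by_cases hc : c = '/'
      · subst hc
        rw [PySem.Chars.count.go]
        simp only [List.isPrefixOf, List.isPrefixOf_cons₂, beq_self_eq_true, Bool.true_and,
          List.isPrefixOf_nil_left, if_pos]
        simp only [List.length_singleton, List.drop_succ_cons, List.drop_zero]
        rw [ih f (acc + 1) hf]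
        simp [List.count_cons]
        omega
      · rw [PySem.Chars.count.go]
        have hpre : List.isPrefixOf ['/'] (c :: rest) = false := by
          simp [List.isPrefixOf]
          exact fun hb => hc hb.symm
        rw [if_neg (by simp [hpre])]
        rw [ih f acc hf]
        simp [List.count_cons, hc]

theorem count_eq_listCount (cs : List Char) : PySem.Chars.count cs ['/'] = cs.count '/' := by
  unfold PySem.Chars.count
  rw [if_neg (by simp)]
  rw [count_go_eq cs cs.length 0 (le_refl _)]
  omega

theorem join_cons_head (sep : List Char) (c : Char) (p : List Char) (t : List (List Char)) :
    PySem.Chars.join sep ((c :: p) :: t) = c :: PySem.Chars.join sep (p :: t) := by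
  cases t with
  | nil => simp [PySem.Chars.join_singleton]
  | cons q rest => simp [PySem.Chars.join_cons_cons]

theorem join_take_pvSplit (cs : List Char) : ∀ (k : Nat),
    PySem.Chars.join ['/'] ((pvSplit cs).take (k + 1)) = pvCut cs k := by
  induction cs with
  | nil => intro k; simp [pvSplit, pvCut, PySem.Chars.join_singleton]
  | cons c rest ih =>
    intro k
    by_cases hc : c = '/'
    · subst hc
      rw [show pvSplit ('/' :: rest) = [] :: pvSplit rest from by simp [pvSplit]]
      match k with
      | 0 => simp [PySem.Chars.join_singleton, pvCut]
      | Nat.succ k' =>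
        rw [List.take_cons (by omega)]
        simp only [Nat.add_sub_cancel]
        cases hps : (pvSplit rest).take (k' + 1) with
        | nil =>
          have : pvSplit rest ≠ [] := pvSplit_ne_nil rest
          cases h : pvSplit rest with
          | nil => exact absurd h this
          | cons p ps => rw [h] at hps; simp at hps
        | cons p ps =>
          rw [PySem.Chars.join_cons_cons]
          rw [← hps, ih k']
          simp [pvCut]
    · simp only [pvSplit, if_neg hc, pvCut]
      cases h : pvSplit rest with
      | nil => exact absurd h (pvSplit_ne_nil rest)
      | cons p ps =>
        simp only [List.modifyHead]
        rw [List.take_cons (by omega), Nat.add_sub_cancel, join_cons_head]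
        rw [show p :: List.take k ps = List.take (k + 1) (pvSplit rest) from by
          rw [h, List.take_cons (by omega), Nat.add_sub_cancel]]
        rw [ih k]

theorem pvCut_of_count_le (cs : List Char) : ∀ (k : Nat), cs.count '/' ≤ k → pvCut cs k = cs := by
  induction cs with
  | nil => intro k _; rfl
  | cons c rest ih =>
    intro k h
    by_cases hc : c = '/'
    · subst hc
      simp only [List.count_cons, beq_self_eq_true, if_pos] at h
      match k with
      | Nat.succ k' =>
        rw [show pvCut ('/' :: rest) (Nat.succ k') = '/' :: pvCut rest k' from by simp [pvCut]]
        rw [ih k' (by omega)]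
    · simp only [pvCut, if_neg hc]
      rw [ih k (by simpa [List.count_cons, hc] using h)]

theorem perLink (link : String) :
    (if PySem.Str.count link "/" > 2 then
      PySem.Str.join "/" (PySem.List.slice ((PySem.Str.split? link "/").getD []) none (some 3))
    else link) = String.ofList (pvCut link.toList 2) := by
  have hcount : PySem.Str.count link "/" = link.toList.count '/' := by
    rw [PySem.Str.count_eq]
    exact count_eq_listCount link.toList
  by_cases h : PySem.Str.count link "/" > 2
  · rw [if_pos h]
    -- split? is some parts with parts.map toList = pvSplit link.toList
    have hmap := PySem.Str.split?_map link "/"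
    have hsep : ("/" : String).toList = ['/'] := rfl
    rw [hsep] at hmap
    unfold PySem.Chars.split? at hmap
    rw [if_neg (by simp)] at hmap
    cases hs : PySem.Str.split? link "/" with
    | none => rw [hs] at hmap; simp at hmap
    | some parts =>
      rw [hs] at hmap
      simp only [Option.map_some, Option.some.injEq] at hmap
      have hparts : parts.map String.toList = pvSplit link.toList := by
        rw [hmap, splitOn_eq_pvSplit]
      simp only [Option.getD_some]
      apply String.ext  -- equality of strings via data
      show (PySem.Str.join "/" (PySem.List.slice parts none (some 3))).toList = _
      rw [PySem.Str.toList_join]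
      rw [PySem.List.slice_to parts (by norm_num : (0:Int) ≤ 3)]
      have h3 : ((3:Int)).toNat = 3 := rfl
      rw [h3, hsep, List.map_take, hparts]
      rw [String.toList_ofList]
      exact join_take_pvSplit link.toList 2
  · rw [if_neg h]
    rw [hcount] at h
    have : pvCut link.toList 2 = link.toList := pvCut_of_count_le link.toList 2 (by omega)
    rw [this]
    exact String.ofList_toList.symm

-- ===== VERDICT (by name: the statement is the Claim_ definition above) =====
theorem linkCutter_spec : Claim_equal_linkCutter := by
  intro links _
  unfold Spec_linkCutter linkCutter linkCutter_alt
  have hfun : (fun (adjs : List String) (link : String) =>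
      if PySem.Str.count link "/" > 2 then
        adjs ++ [PySem.Str.join "/" (PySem.List.slice ((PySem.Str.split? link "/").getD []) none (some 3))]
      else adjs ++ [link]) =
      fun adjs link => adjs ++ [if PySem.Str.count link "/" > 2 then
        PySem.Str.join "/" (PySem.List.slice ((PySem.Str.split? link "/").getD []) none (some 3))
      else link] := by
    funext adjs link
    split_ifs <;> rfl
  rw [hfun, PySem.List.foldl_append_singleton_eq_map]
  simp only [List.nil_append]
  exact List.map_congr_left (fun link _ => perLink link)
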